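-- pv_equiv track=rewrite | github.com/alvee42/trading-agent-tools | Weather_Tools/schwab/contracts.py | _get_next_quarterly_month
-- ===== SOURCE A (Python) =====
-- from typing import Tuple
--
-- QUARTERLY_MONTHS = [3, 6, 9, 12]
--
-- def _get_next_quarterly_month(month: int, year: int) -> Tuple[int, int]:
--     """
--     Get the next quarterly month after the given month.
--
--     Args:
--         month: Current month
--         year: Current year
--
--     Returns:
--         Tuple of (next_month, next_year)
--     """
--     try:
--         idx = QUARTERLY_MONTHS.index(month)
--         if idx == len(QUARTERLY_MONTHS) - 1:
--             # December, wrap to March next year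
--             return QUARTERLY_MONTHS[0], year + 1
--         else:
--             return QUARTERLY_MONTHS[idx + 1], year
--     except ValueError:
--         # Month is not quarterly, find next quarterly
--         for quarterly_month in QUARTERLY_MONTHS:
--             if quarterly_month > month:
--                 return quarterly_month, year
--         # Wrap to next year
--         return QUARTERLY_MONTHS[0], year + 1
-- ===== SOURCE B (Python) =====
-- from typing import Tuple
--
-- def _get_next_quarterly_month(month: int, year: int) -> Tuple[int, int]:
--     """Threshold cascade: no list, no index lookup, no scan."""
--     if month >= 12:
--         return 3, year + 1
--     if month >= 9:
--         return 12, year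
--     if month >= 6:
--         return 9, year
--     if month >= 3:
--         return 6, year
--     return 3, year
-- ===== Notes on version B (the rewrite author's own statement) =====
-- stated objective: simpler
-- what changed: Replaced the QUARTERLY_MONTHS list, the .index lookup with try/except and the linear scan by a direct four-way comparison cascade on month.
import Mathlib
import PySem

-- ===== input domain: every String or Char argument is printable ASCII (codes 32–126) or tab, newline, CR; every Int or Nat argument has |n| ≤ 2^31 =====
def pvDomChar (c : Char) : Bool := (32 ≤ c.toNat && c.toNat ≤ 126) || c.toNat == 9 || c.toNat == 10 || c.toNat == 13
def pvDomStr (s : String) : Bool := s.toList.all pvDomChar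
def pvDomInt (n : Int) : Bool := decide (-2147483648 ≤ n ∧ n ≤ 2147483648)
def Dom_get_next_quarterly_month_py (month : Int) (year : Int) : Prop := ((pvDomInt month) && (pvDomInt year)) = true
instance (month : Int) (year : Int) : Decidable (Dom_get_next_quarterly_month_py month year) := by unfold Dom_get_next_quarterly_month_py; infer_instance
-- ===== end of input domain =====

-- B replaces A's list lookup / scan by a direct comparison cascade (objective: simpler).

-- ===== PORT A =====
def pvQuarterlyMonths : List Int := [3, 6, 9, 12]

-- the for-loop of the except branch: first quarterly month > month, else wrap
def pvScanA : List Int → Int → Int → Int × Int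
  | [], _, year => (pvQuarterlyMonths.headD 0, year + 1)
  | q :: rest, month, year => if q > month then (q, year) else pvScanA rest month year

def get_next_quarterly_month_py (month : Int) (year : Int) : Int × Int :=
  match PySem.List.index? pvQuarterlyMonths month with
  | some idx =>
      if idx == pvQuarterlyMonths.length - 1 then (pvQuarterlyMonths.headD 0, year + 1)
      else (pvQuarterlyMonths.getD (idx + 1) 0, year)
  | none => pvScanA pvQuarterlyMonths month year

-- ===== PORT B =====
def get_next_quarterly_month_py_alt (month : Int) (year : Int) : Int × Int :=
  if month ≥ 12 then (3, year + 1)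
  else if month ≥ 9 then (12, year)
  else if month ≥ 6 then (9, year)
  else if month ≥ 3 then (6, year)
  else (3, year)

-- ===== PRECONDITION & SPEC =====
def Spec_get_next_quarterly_month_py (month : Int) (year : Int) (out : Int × Int) : Prop := out = get_next_quarterly_month_py_alt month year
instance (month : Int) (year : Int) (out : Int × Int) : Decidable (Spec_get_next_quarterly_month_py month year out) := by unfold Spec_get_next_quarterly_month_py; infer_instance

-- ===== CLAIM (what is proved, stated in full; the proofs are below) =====
def Claim_equal_get_next_quarterly_month_py : Prop := ∀ (month : Int) (year : Int), Dom_get_next_quarterly_month_py month year → Spec_get_next_quarterly_month_py month year (get_next_quarterly_month_py month year)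

-- ===== LEMMAS AND PROOFS =====

-- ===== VERDICT (by name: the statement is the Claim_ definition above) =====
theorem get_next_quarterly_month_py_spec : Claim_equal_get_next_quarterly_month_py := by
  intro month year _
  unfold Spec_get_next_quarterly_month_py get_next_quarterly_month_py get_next_quarterly_month_py_alt pvScanA pvQuarterlyMonths
  rw [PySem.List.index?_eq_idxOf?]
  simp only [List.idxOf?, List.findIdx?, List.findIdx?.go]
  by_cases h3 : month = 3 <;> by_cases h6 : month = 6 <;> by_cases h9 : month = 9 <;>
    by_cases h12 : month = 12 <;>
    simp_all [pvScanA, pvQuarterlyMonths] <;> split_ifs <;> simp_all <;> omega
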